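-- pv_equiv track=rewrite | github.com/xraspberry/Algorithm-In-Leetcode | sword_offer/problem_3_1.py | method_1
-- ===== SOURCE A (Python) =====
-- def method_1(array):
--     """
--     通过排序的办法
--     :return:
--     """
--     if len(array) <= 1:
--         return False, None
--     sorted_array = sorted(array)
--     for idx, item in enumerate(sorted_array[1:], 1):
--         if item == sorted_array[idx-1]:
--             return True, item
--     return False, None
-- ===== SOURCE B (Python) =====
-- def method_1(array):
--     if len(array) <= 1:
--         return False, None
--     seen = set()
--     dups = set()
--     for x in array:
--         if x in seen:
--             dups.add(x)
--         else:
--             seen.add(x)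
--     if dups:
--         return True, min(dups)
--     return False, None
-- ===== Notes on version B (the rewrite author's own statement) =====
-- stated objective: alternative
-- what changed: Replaces the sort-then-adjacent-scan with a single pass over the list maintaining a seen-set and a duplicates-set, returning the minimum of the duplicates.
import Mathlib
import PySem

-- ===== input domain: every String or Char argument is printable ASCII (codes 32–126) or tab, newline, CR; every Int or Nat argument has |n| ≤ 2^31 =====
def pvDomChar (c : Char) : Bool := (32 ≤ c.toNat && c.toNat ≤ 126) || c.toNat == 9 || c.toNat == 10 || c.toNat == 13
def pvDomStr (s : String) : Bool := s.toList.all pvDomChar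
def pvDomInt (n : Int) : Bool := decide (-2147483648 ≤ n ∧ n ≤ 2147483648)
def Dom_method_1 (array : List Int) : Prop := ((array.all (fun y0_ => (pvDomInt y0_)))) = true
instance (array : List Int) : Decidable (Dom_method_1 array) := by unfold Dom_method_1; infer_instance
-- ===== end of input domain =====

-- Header: B drops A's sort entirely: one pass maintaining a seen-set and a duplicates-set,
-- then the minimum of the duplicates (objective: alternative single-pass algorithm).

-- ===== PORT A =====
-- the 'for idx, item in enumerate(sorted_array[1:], 1)' loop: scan adjacent pairs,
-- carrying the previous element (sorted_array[idx-1])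
def pvScanA : Int → List Int → Bool × Option Int
  | _, [] => (false, none)
  | prev, x :: xs => if x = prev then (true, some x) else pvScanA x xs

def method_1 (array : List Int) : Bool × Option Int :=
  if array.length ≤ 1 then (false, none)
  else
    match PySem.List.sorted array (fun x => x) false with
    | [] => (false, none)
    | h :: t => pvScanA h t

-- ===== PORT B =====
-- one iteration of B's 'for x in array' loop over the (seen, dups) pair of sets
def pvStep (p : List Int × List Int) (x : Int) : List Int × List Int :=
  if PySem.Set.contains p.1 x then (p.1, PySem.Set.add p.2 x)
  else (PySem.Set.add p.1 x, p.2)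

def method_1_alt (array : List Int) : Bool × Option Int :=
  if array.length ≤ 1 then (false, none)
  else
    let sd := array.foldl pvStep ([], [])
    if sd.2 = [] then (false, none)
    else (true, PySem.List.min? sd.2 (fun x => x))

-- ===== PRECONDITION & SPEC =====
def Spec_method_1 (array : List Int) (out : Bool × Option Int) : Prop := out = method_1_alt array
instance (array : List Int) (out : Bool × Option Int) : Decidable (Spec_method_1 array out) := by unfold Spec_method_1; infer_instance

-- ===== CLAIM (what is proved, stated in full; the proofs are below) =====
def Claim_equal_method_1 : Prop := ∀ (array : List Int), Dom_method_1 array → Spec_method_1 array (method_1 array)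

-- ===== LEMMAS AND PROOFS =====

-- top-level form of A's scan over the sorted list
def pvScanTop : List Int → Bool × Option Int
  | [] => (false, none)
  | h :: t => pvScanA h t

lemma scanTop_nodup : ∀ (s : List Int), s.Pairwise (· ≤ ·) → s.Nodup →
    pvScanTop s = (false, none) := by
  intro s
  induction s with
  | nil => intro _ _; rfl
  | cons a t ih =>
    intro hp hn
    cases t with
    | nil => rfl
    | cons b rest =>
      have hab : a ≠ b := by
        intro h; subst h
        exact (List.nodup_cons.mp hn).1 (List.mem_cons_self)
      show pvScanA a (b :: rest) = (false, none)
      simp only [pvScanA, if_neg (Ne.symm hab)]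
      exact ih hp.of_cons (List.nodup_cons.mp hn).2

lemma scanTop_dup : ∀ (s : List Int), s.Pairwise (· ≤ ·) → ¬ s.Nodup →
    ∃ m, pvScanTop s = (true, some m) ∧ 2 ≤ s.count m ∧ ∀ y, 2 ≤ s.count y → m ≤ y := by
  intro s
  induction s with
  | nil => intro _ hn; exact absurd List.nodup_nil hn
  | cons a t ih =>
    intro hp hn
    cases t with
    | nil => exact absurd (List.nodup_singleton a) hn
    | cons b rest =>
      by_cases hab : a = b
      · refine ⟨a, ?_, ?_, ?_⟩
        · show pvScanA a (b :: rest) = (true, some a)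
          simp [pvScanA, hab.symm]
        · subst hab
          simp
        · intro y hy
          have hymem : y ∈ a :: b :: rest := List.count_pos_iff.mp (by omega)
          rcases List.mem_cons.mp hymem with h | h
          · omega
          · exact (List.pairwise_cons.mp hp).1 y h
      · -- a < every element of b :: rest, so a is not duplicated
        have hb : a ≤ b := (List.pairwise_cons.mp hp).1 b (List.mem_cons_self)
        have halt : ∀ y ∈ b :: rest, a < y := by
          intro y hy
          rcases List.mem_cons.mp hy with h | h
          · subst h; omega
          · have h1 : b ≤ y := (List.pairwise_cons.mp hp.of_cons).1 y h
            omega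
        have hanot : a ∉ b :: rest := fun h => absurd (halt a h) (lt_irrefl a)
        have hn' : ¬ (b :: rest).Nodup := by
          intro h; exact hn (List.nodup_cons.mpr ⟨hanot, h⟩)
        obtain ⟨m, hscan, hcnt, hmin⟩ := ih hp.of_cons hn'
        have hmmem : m ∈ b :: rest := List.count_pos_iff.mp (by omega)
        have hma : m ≠ a := fun h => hanot (h ▸ hmmem)
        refine ⟨m, ?_, ?_, ?_⟩
        · show pvScanA a (b :: rest) = (true, some m)
          simp only [pvScanA, if_neg (Ne.symm hab)]
          exact hscan
        · rw [List.count_cons]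
          omega
        · intro y hy
          by_cases hya : y = a
          · exfalso
            have h0 : List.count y (b :: rest) = 0 := List.count_eq_zero_of_not_mem (hya ▸ hanot)
            rw [List.count_cons, h0] at hy
            simp [hya] at hy
          · refine hmin y ?_
            rw [List.count_cons] at hy
            simp [Ne.symm hya] at hy
            omega

lemma method_1_eq_scanTop (array : List Int) (h : ¬ array.length ≤ 1) :
    method_1 array = pvScanTop (PySem.List.sorted array (fun x => x) false) := by
  unfold method_1
  rw [if_neg h]
  cases PySem.List.sorted array (fun x => x) false <;> rfl

-- invariant of B's loop: seen accumulates the elements, dups the duplicated ones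
lemma pvStep_fold_mem : ∀ (l : List Int) (s d : List Int),
    (∀ x, x ∈ (l.foldl pvStep (s, d)).2 ↔ x ∈ d ∨ (x ∈ l ∧ (x ∈ s ∨ 2 ≤ l.count x))) := by
  intro l
  induction l with
  | nil => intro s d x; simp
  | cons a t ih =>
    intro s d x
    rw [List.foldl_cons]
    by_cases ha : a ∈ s
    · have hstep : pvStep (s, d) a = (s, PySem.Set.add d a) := by
        unfold pvStep
        rw [if_pos ((PySem.Set.contains_iff s a).mpr ha)]
      rw [hstep, ih s (PySem.Set.add d a) x, PySem.Set.mem_add]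
      by_cases hxa : x = a
      · subst hxa
        simp [List.mem_cons, ha]
      · have hax : ¬ a = x := fun h => hxa h.symm
        have hcc : List.count x (a :: t) = List.count x t := by
          simp [hax]
        simp only [List.mem_cons, hcc]
        constructor
        · rintro ((h | h) | h)
          · exact Or.inl h
          · exact absurd h hxa
          · exact Or.inr ⟨Or.inr h.1, h.2⟩
        · rintro (h | ⟨h1 | h1, h2⟩)
          · exact Or.inl (Or.inl h)
          · exact absurd h1 hxa
          · exact Or.inr ⟨h1, h2⟩
    · have hstep : pvStep (s, d) a = (PySem.Set.add s a, d) := by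
        unfold pvStep
        rw [if_neg (fun h => ha ((PySem.Set.contains_iff s a).mp h))]
      rw [hstep, ih (PySem.Set.add s a) d x]
      by_cases hxa : x = a
      · subst hxa
        have hcc : List.count x (x :: t) = List.count x t + 1 := by
          simp
        have hiff : (2 ≤ List.count x t + 1) ↔ x ∈ t := by
          constructor
          · intro h; exact List.count_pos_iff.mp (by omega)
          · intro h; have := List.count_pos_iff.mpr h; omega
        simp [List.mem_cons, ha, hcc, hiff]
      · have hax : ¬ a = x := fun h => hxa h.symm
        have hcc : List.count x (a :: t) = List.count x t := by
          simp [hax]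
        simp only [PySem.Set.mem_add, List.mem_cons, hcc]
        constructor
        · rintro (h | ⟨h1, (h2 | h2) | h2⟩)
          · exact Or.inl h
          · exact Or.inr ⟨Or.inr h1, Or.inl h2⟩
          · exact absurd h2 hxa
          · exact Or.inr ⟨Or.inr h1, Or.inr h2⟩
        · rintro (h | ⟨h1 | h1, h2 | h2⟩)
          · exact Or.inl h
          · exact absurd h1 hxa
          · exact absurd h1 hxa
          · exact Or.inr ⟨h1, Or.inl (Or.inl h2)⟩
          · exact Or.inr ⟨h1, Or.inr h2⟩

lemma dups_mem (array : List Int) (x : Int) :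
    x ∈ (array.foldl pvStep ([], [])).2 ↔ 2 ≤ array.count x := by
  rw [pvStep_fold_mem array [] []]
  constructor
  · rintro (h | ⟨_, h | h⟩) <;> first | exact h | simp at h
  · intro h
    exact Or.inr ⟨List.count_pos_iff.mp (by omega), Or.inr h⟩

lemma main_eq (array : List Int) : method_1 array = method_1_alt array := by
  by_cases hlen : array.length ≤ 1
  · unfold method_1 method_1_alt
    rw [if_pos hlen, if_pos hlen]
  · have hperm : (PySem.List.sorted array (fun x => x) false).Perm array :=
      PySem.List.sorted_perm array (fun x => x) false
    have hpw : (PySem.List.sorted array (fun x => x) false).Pairwise (· ≤ ·) :=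
      PySem.List.sorted_pairwise array (fun x => x)
    rw [method_1_eq_scanTop array hlen]
    unfold method_1_alt
    rw [if_neg hlen]
    by_cases hn : array.Nodup
    · have hsn : (PySem.List.sorted array (fun x => x) false).Nodup := hperm.nodup_iff.mpr hn
      rw [scanTop_nodup _ hpw hsn]
      have hd : (array.foldl pvStep ([], [])).2 = [] := by
        rw [List.eq_nil_iff_forall_not_mem]
        intro x hx
        have h2 := (dups_mem array x).mp hx
        have := List.nodup_iff_count_le_one.mp hn x
        omega
      simp [hd]
    · obtain ⟨m, hscan, hcnt, hmin⟩ :=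
        scanTop_dup _ hpw (fun h => hn (hperm.nodup_iff.mp h))
      rw [hscan]
      -- counts in the sorted list = counts in array
      have hc : ∀ y, (PySem.List.sorted array (fun x => x) false).count y = array.count y :=
        fun y => hperm.count_eq y
      have hmarr : 2 ≤ array.count m := by rw [← hc]; exact hcnt
      have hmem : m ∈ (array.foldl pvStep ([], [])).2 := (dups_mem array m).mpr hmarr
      have hne : (array.foldl pvStep ([], [])).2 ≠ [] := List.ne_nil_of_mem hmem
      simp only [if_neg hne]
      rcases hmq : PySem.List.min? (array.foldl pvStep ([], [])).2 (fun x => x) with _ | m'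
      · exact absurd ((PySem.List.min?_eq_none_iff _ _).mp hmq) hne
      · have hm'mem := PySem.List.min?_mem hmq
        have hm'min := PySem.List.min?_isMin hmq
        have h1 : m' ≤ m := hm'min m hmem
        have h2 : m ≤ m' := by
          have hp := (dups_mem array m').mp hm'mem
          exact hmin m' (by rw [hc]; exact hp)
        have : m = m' := le_antisymm h2 h1
        rw [this]

-- ===== VERDICT (by name: the statement is the Claim_ definition above) =====
theorem method_1_spec : Claim_equal_method_1 := by
  intro array _
  unfold Spec_method_1
  exact main_eq array
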